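-- pv_equiv track=rewrite | github.com/AndrewLane/advent_of_code_2024 | day3/puzzle2.py | is_mult_enabled
-- ===== SOURCE A (Python) =====
-- def is_mult_enabled(index: int, indexes_of_dont_token: int, indexes_of_do_token: int) -> bool:
--     do_token_indices = [idx for idx in indexes_of_do_token if idx < index]
--     dont_token_indices = [idx for idx in indexes_of_dont_token if idx < index]
--     most_recent_do = max(do_token_indices) if do_token_indices else -1
--     most_recent_dont = max(dont_token_indices) if dont_token_indices else -1
--     if most_recent_do > 0 and most_recent_dont > 0:
--         return most_recent_do > most_recent_dont
--     elif most_recent_do > 0: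
--         return True
--     elif most_recent_dont > 0:
--         return False
--     return True
-- ===== SOURCE B (Python) =====
-- def is_mult_enabled(index: int, indexes_of_dont_token: int, indexes_of_do_token: int) -> bool:
--     # Single reduction over both token streams: keep the best (idx, tag) pair
--     # among tokens with 0 < idx < index; tag 1 = don't, tag 0 = do, so on an
--     # index tie the don't token wins the tuple comparison.
--     best = None
--     for tag, tokens in ((1, indexes_of_dont_token), (0, indexes_of_do_token)):
--         for idx in tokens:
--             if 0 < idx < index:
--                 cand = (idx, tag)
--                 if best is None or cand > best:
--                     best = cand
--     return best is None or best[1] == 0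
-- ===== Notes on version B (the rewrite author's own statement) =====
-- stated objective: simpler
-- what changed: B replaces the two filter-then-max scans and the 4-way branch by one reduction over both token lists tagged do/dont, tracking only the single best qualifying (index, tag) pair and reading the answer off its tag.
import Mathlib
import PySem

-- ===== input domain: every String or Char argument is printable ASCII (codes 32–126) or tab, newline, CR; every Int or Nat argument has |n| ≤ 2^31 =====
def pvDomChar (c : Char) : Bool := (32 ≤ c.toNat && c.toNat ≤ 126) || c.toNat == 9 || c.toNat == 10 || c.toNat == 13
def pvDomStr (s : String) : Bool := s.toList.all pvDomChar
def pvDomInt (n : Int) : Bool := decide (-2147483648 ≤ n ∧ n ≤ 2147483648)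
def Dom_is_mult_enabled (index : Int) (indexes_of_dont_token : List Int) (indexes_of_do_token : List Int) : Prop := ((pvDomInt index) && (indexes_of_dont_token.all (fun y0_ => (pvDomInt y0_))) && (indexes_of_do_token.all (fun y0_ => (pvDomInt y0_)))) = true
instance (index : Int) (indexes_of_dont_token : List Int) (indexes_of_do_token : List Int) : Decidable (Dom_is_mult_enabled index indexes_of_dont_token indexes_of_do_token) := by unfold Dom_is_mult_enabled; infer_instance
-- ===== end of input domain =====

-- B: one tagged reduction over both token lists instead of two filter+max scans and a 4-way branch (objective: simpler).

-- ===== PORT A =====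
def is_mult_enabled (index : Int) (indexes_of_dont_token : List Int) (indexes_of_do_token : List Int) : Bool :=
  let do_token_indices := indexes_of_do_token.filter (fun idx => decide (idx < index))
  let dont_token_indices := indexes_of_dont_token.filter (fun idx => decide (idx < index))
  let most_recent_do : Int := match PySem.List.max? do_token_indices (fun x => x) with
    | some m => m
    | none => -1
  let most_recent_dont : Int := match PySem.List.max? dont_token_indices (fun x => x) with
    | some m => m
    | none => -1
  if decide (most_recent_do > 0) && decide (most_recent_dont > 0) then
    decide (most_recent_do > most_recent_dont)
  else if most_recent_do > 0 then
    true
  else if most_recent_dont > 0 then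
    false
  else
    true

-- ===== PORT B =====
-- Python tuple comparison '>' on (Int, Int), lexicographic
def pvTupGt (a b : Int × Int) : Bool := decide (a.1 > b.1) || (decide (a.1 = b.1) && decide (a.2 > b.2))

-- the inner 'for idx in tokens' loop of Source B for one tagged list
def pvScan (index : Int) (tag : Int) (tokens : List Int) (best : Option (Int × Int)) : Option (Int × Int) :=
  tokens.foldl (fun best idx =>
    if 0 < idx ∧ idx < index then
      match best with
      | none => some (idx, tag)
      | some b => if pvTupGt (idx, tag) b then some (idx, tag) else some b
    else best) best

def is_mult_enabled_alt (index : Int) (indexes_of_dont_token : List Int) (indexes_of_do_token : List Int) : Bool :=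
  match pvScan index 0 indexes_of_do_token (pvScan index 1 indexes_of_dont_token none) with
  | none => true
  | some b => decide (b.2 = 0)

-- ===== PRECONDITION & SPEC =====
def Spec_is_mult_enabled (index : Int) (indexes_of_dont_token : List Int) (indexes_of_do_token : List Int) (out : Bool) : Prop := out = is_mult_enabled_alt index indexes_of_dont_token indexes_of_do_token
instance (index : Int) (indexes_of_dont_token : List Int) (indexes_of_do_token : List Int) (out : Bool) : Decidable (Spec_is_mult_enabled index indexes_of_dont_token indexes_of_do_token out) := by unfold Spec_is_mult_enabled; infer_instance

-- ===== CLAIM (what is proved, stated in full; the proofs are below) =====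
def Claim_equal_is_mult_enabled : Prop := ∀ (index : Int) (indexes_of_dont_token : List Int) (indexes_of_do_token : List Int), Dom_is_mult_enabled index indexes_of_dont_token indexes_of_do_token → Spec_is_mult_enabled index indexes_of_dont_token indexes_of_do_token (is_mult_enabled index indexes_of_dont_token indexes_of_do_token)

-- ===== LEMMAS AND PROOFS =====

-- reference quantity: the maximum token index with 0 < idx < index, if any
def mQ (index : Int) : List Int → Option Int
  | [] => none
  | i :: t =>
    if 0 < i ∧ i < index then
      some ((mQ index t).elim i (fun a => max i a))
    else mQ index t

theorem mQ_none_no_qual (index : Int) (l : List Int) (h : mQ index l = none) :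
    ∀ y ∈ l, 0 < y → y < index → False := by
  induction l with
  | nil => simp
  | cons i t ih =>
    simp only [mQ] at h
    split at h
    · cases h
    · rename_i hq
      intro y hy hy0 hyi
      rcases List.mem_cons.1 hy with rfl | hy
      · exact hq ⟨hy0, hyi⟩
      · exact ih h y hy hy0 hyi

theorem mQ_pos_spec (index : Int) (l : List Int) (m : Int) (h : mQ index l = some m) :
    m ∈ l ∧ 0 < m ∧ m < index ∧ ∀ y ∈ l, 0 < y → y < index → y ≤ m := by
  induction l generalizing m with
  | nil => simp [mQ] at h
  | cons i t ih =>
    simp only [mQ] at h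
    split at h
    · rename_i hq
      cases hmt : mQ index t with
      | none =>
        simp [hmt] at h
        subst h
        refine ⟨by simp, hq.1, hq.2, ?_⟩
        intro y hy hy0 hyi
        rcases List.mem_cons.1 hy with rfl | hy
        · exact le_refl _
        · exact absurd (mQ_none_no_qual index t hmt y hy hy0 hyi) (fun x => x)
      | some a =>
        simp [hmt] at h
        subst h
        obtain ⟨ha1, ha2, ha3, ha4⟩ := ih a hmt
        refine ⟨?_, lt_max_of_lt_left hq.1, max_lt hq.2 ha3, ?_⟩
        · rcases max_choice i a with hc | hc
          · rw [hc]; simp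
          · rw [hc]; exact List.mem_cons_of_mem _ ha1
        · intro y hy hy0 hyi
          rcases List.mem_cons.1 hy with rfl | hy
          · exact le_max_left _ _
          · exact le_trans (ha4 y hy hy0 hyi) (le_max_right _ _)
    · rename_i hq
      obtain ⟨ha1, ha2, ha3, ha4⟩ := ih m h
      refine ⟨List.mem_cons_of_mem _ ha1, ha2, ha3, ?_⟩
      intro y hy hy0 hyi
      rcases List.mem_cons.1 hy with rfl | hy
      · exact absurd ⟨hy0, hyi⟩ hq
      · exact ha4 y hy hy0 hyi

theorem pvScan_cons_none (index tag i : Int) (t : List Int) :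
    pvScan index tag (i :: t) none = pvScan index tag t
      (if 0 < i ∧ i < index then some (i, tag) else none) := by
  simp [pvScan, List.foldl]

theorem pvScan_cons_some (index tag i : Int) (t : List Int) (p : Int × Int) :
    pvScan index tag (i :: t) (some p) = pvScan index tag t
      (if 0 < i ∧ i < index then
        (if pvTupGt (i, tag) p then some (i, tag) else some p)
       else some p) := by
  simp [pvScan, List.foldl]

theorem pvScan_same (index tag : Int) (l : List Int) :
    ∀ m : Int, pvScan index tag l (some (m, tag)) =
      some ((mQ index l).elim m (fun a => max m a), tag) := by
  induction l with
  | nil => intro m; simp [pvScan, mQ]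
  | cons i t ih =>
    intro m
    rw [pvScan_cons_some]
    by_cases hq : 0 < i ∧ i < index
    · have hstep : (if pvTupGt (i, tag) (m, tag) then some (i, tag) else some (m, tag))
          = some ((max m i : Int), tag) := by
        by_cases h : m < i
        · have : max m i = i := max_eq_right h.le
          simp [pvTupGt, h, this]
        · have h2 : ¬ (i > m) := h
          have : max m i = m := max_eq_left (not_lt.1 h)
          simp [pvTupGt, h2, this]
      rw [if_pos hq, hstep, ih (max m i)]
      simp only [mQ]
      rw [if_pos hq]
      cases hmt : mQ index t with
      | none => simp
      | some a =>
        simp only [Option.elim, Option.some.injEq, Prod.mk.injEq]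
        exact ⟨by omega, trivial⟩
    · rw [if_neg hq, ih m]
      simp only [mQ]
      rw [if_neg hq]

theorem pvScan_fromNone (index tag : Int) (l : List Int) :
    pvScan index tag l none = (mQ index l).elim none (fun m => some (m, tag)) := by
  induction l with
  | nil => simp [pvScan, mQ]
  | cons i t ih =>
    rw [pvScan_cons_none]
    by_cases hq : 0 < i ∧ i < index
    · rw [if_pos hq]
      rw [pvScan_same]
      simp only [mQ]
      rw [if_pos hq]
      cases hmt : mQ index t <;> simp
    · rw [if_neg hq]
      simp only [mQ]
      rw [if_neg hq]
      exact ih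

theorem pvScan_zero_from (index : Int) (l : List Int) :
    ∀ b : Int × Int, 0 ≤ b.2 →
      pvScan index 0 l (some b) =
        (mQ index l).elim (some b) (fun a => if b.1 < a then some (a, 0) else some b) := by
  induction l with
  | nil => intro b _; simp [pvScan, mQ]
  | cons i t ih =>
    intro b hb
    rw [pvScan_cons_some]
    by_cases hq : 0 < i ∧ i < index
    · have htup : pvTupGt (i, 0) b = decide (b.1 < i) := by
        by_cases h1 : b.1 < i
        · simp [pvTupGt, h1]
        · simp [pvTupGt, h1]
          intro h2; omega
      rw [if_pos hq, htup]
      by_cases h1 : b.1 < i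
      · rw [if_pos (by simpa using h1)]
        rw [pvScan_same]
        simp only [mQ]
        rw [if_pos hq]
        cases hmt : mQ index t with
        | none => simp [h1]
        | some a =>
          simp only [Option.elim]
          have hlt : b.1 < max i a := by omega
          simp [hlt]
      · rw [if_neg (by simpa using h1)]
        rw [ih b hb]
        simp only [mQ]
        rw [if_pos hq]
        cases hmt : mQ index t with
        | none =>
          simp only [Option.elim]
          simp [h1]
        | some a =>
          simp only [Option.elim]
          by_cases h2 : b.1 < a
          · have hmax : max i a = a := by omega
            have hlt : b.1 < max i a := by omega
            simp [h2, hmax]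
          · have hlt : ¬ b.1 < max i a := by omega
            simp [h2, hlt]
    · rw [if_neg hq]
      rw [ih b hb]
      simp only [mQ]
      rw [if_neg hq]

-- A's "most_recent" value for one list
def mrOf (index : Int) (l : List Int) : Int :=
  match PySem.List.max? (l.filter (fun idx => decide (idx < index))) (fun x => x) with
  | some m => m
  | none => -1

theorem mr_some (index : Int) (l : List Int) (m : Int) (h : mQ index l = some m) :
    mrOf index l = m := by
  obtain ⟨hmem, hpos, hlt, hmax⟩ := mQ_pos_spec index l m h
  have hmf : m ∈ l.filter (fun idx => decide (idx < index)) := by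
    rw [List.mem_filter]
    exact ⟨hmem, by simpa using hlt⟩
  unfold mrOf
  cases hM : PySem.List.max? (l.filter (fun idx => decide (idx < index))) (fun x => x) with
  | none =>
    rw [PySem.List.max?_eq_none_iff] at hM
    rw [hM] at hmf
    cases hmf
  | some M =>
    have hMmem := PySem.List.max?_mem hM
    have hMmax := PySem.List.max?_isMax hM
    obtain ⟨hMl, hMlt⟩ := List.mem_filter.1 hMmem
    have hmM : m ≤ M := hMmax m hmf
    have hMm : M ≤ m := hmax M hMl (by omega) (by simpa using hMlt)
    show M = m
    omega

theorem mr_nonpos (index : Int) (l : List Int) (h : mQ index l = none) :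
    mrOf index l ≤ 0 := by
  unfold mrOf
  cases hM : PySem.List.max? (l.filter (fun idx => decide (idx < index))) (fun x => x) with
  | none => show (-1 : Int) ≤ 0; norm_num
  | some M =>
    obtain ⟨hMl, hMlt⟩ := List.mem_filter.1 (PySem.List.max?_mem hM)
    show M ≤ 0
    by_contra hc
    exact mQ_none_no_qual index l h M hMl (by omega) (by simpa using hMlt)

theorem is_mult_enabled_as_mr (index : Int) (d o : List Int) :
    is_mult_enabled index d o =
      (if decide (mrOf index o > 0) && decide (mrOf index d > 0) then
        decide (mrOf index o > mrOf index d)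
      else if mrOf index o > 0 then true
      else if mrOf index d > 0 then false
      else true) := rfl

theorem ports_agree (index : Int) (d o : List Int) :
    is_mult_enabled index d o = is_mult_enabled_alt index d o := by
  rw [is_mult_enabled_as_mr]
  unfold is_mult_enabled_alt
  rw [pvScan_fromNone]
  cases hmd : mQ index d with
  | none =>
    have hd := mr_nonpos index d hmd
    simp only [Option.elim]
    rw [pvScan_fromNone]
    cases hmo : mQ index o with
    | none =>
      have ho := mr_nonpos index o hmo
      simp only [Option.elim]
      have h1 : ¬ mrOf index o > 0 := by omega
      have h2 : ¬ mrOf index d > 0 := by omega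
      simp [h1, h2]
    | some a =>
      have ho := mr_some index o a hmo
      have ⟨_, hapos, _, _⟩ := mQ_pos_spec index o a hmo
      simp only [Option.elim]
      have h1 : mrOf index o > 0 := by omega
      have h2 : ¬ mrOf index d > 0 := by omega
      simp [h1, h2]
  | some b =>
    have hd := mr_some index d b hmd
    have ⟨_, hbpos, _, _⟩ := mQ_pos_spec index d b hmd
    simp only [Option.elim]
    rw [pvScan_zero_from index o (b, 1) (by norm_num)]
    cases hmo : mQ index o with
    | none =>
      have ho := mr_nonpos index o hmo
      simp only [Option.elim]
      have h1 : ¬ mrOf index o > 0 := by omega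
      have h2 : mrOf index d > 0 := by omega
      simp [h1, h2]
    | some a =>
      have ho := mr_some index o a hmo
      have ⟨_, hapos, _, _⟩ := mQ_pos_spec index o a hmo
      simp only [Option.elim]
      have h1 : mrOf index o > 0 := by omega
      have h2 : mrOf index d > 0 := by omega
      by_cases hab : (b : Int) < a
      · have h3 : mrOf index o > mrOf index d := by omega
        simp [h1, h2, hab, h3]
      · have h3 : ¬ mrOf index o > mrOf index d := by omega
        simp [h1, h2, hab, h3]

theorem is_mult_enabled_spec : Claim_equal_is_mult_enabled := by
  intro index d o _
  unfold Spec_is_mult_enabled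
  exact ports_agree index d o
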